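-- pv_equiv track=rewrite | github.com/synqing/Lightwave-Ledstrip | tools/palette_extractor.py | find_visible_range
-- ===== SOURCE A (Python) =====
-- def get_color_brightness(r, g, b):
--     """
--     Calculate color brightness (max of RGB components).
--     Returns maximum of R, G, B values.
--     """
--     return max(r, g, b)
--
-- def is_white_color(r, g, b, threshold=200):
--     """
--     Check if a color is white or near-white (very bright with low saturation).
--     WS2812 LEDs don't display white well, so we skip these.
--
--     Args:
--         r, g, b: RGB components (0-255)
--         threshold: Minimum value for components to be considered white
--
--     Returns:
--         True if color is white-like (very bright with low saturation)
--     """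
--     max_val = max(r, g, b)
--     min_val = min(r, g, b)
--
--     # Very bright (max > 240) and low saturation (min is close to max)
--     if max_val > 240:
--         # If min is also high, it's white
--         if min_val >= threshold:
--             return True
--         # If two components are very high and third is moderately high, it's near-white
--         sorted_vals = sorted([r, g, b], reverse=True)
--         if sorted_vals[0] >= 240 and sorted_vals[1] >= 240 and sorted_vals[2] >= 150:
--             return True
--
--     # Traditional check: all components above threshold
--     return r >= threshold and g >= threshold and b >= threshold
--
-- def find_visible_range(stops, min_brightness=10, white_threshold=200):
--     """
--     Find the visible color range in a palette by skipping black/dim and white endpoints.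
--     WS2812 LEDs don't display white well, so we skip white colors.
--
--     Args:
--         stops: list of (position, r, g, b) tuples, sorted by position
--         min_brightness: minimum brightness threshold (max RGB component) to consider visible
--         white_threshold: RGB threshold for considering a color white (all components >= this)
--
--     Returns:
--         (start_pos, end_pos) tuple representing the visible range
--         If no visible colors found, returns (0, 255)
--     """
--     if not stops:
--         return (0, 255)
--
--     # Find first position with visible, non-white color
--     start_pos = 0
--     for pos, r, g, b in stops:
--         brightness = get_color_brightness(r, g, b)
--         if brightness > min_brightness and not is_white_color(r, g, b, white_threshold):
--             start_pos = pos
--             break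
--
--     # Find last position with visible, non-white color (scan backwards)
--     end_pos = 255
--     for pos, r, g, b in reversed(stops):
--         brightness = get_color_brightness(r, g, b)
--         if brightness > min_brightness and not is_white_color(r, g, b, white_threshold):
--             end_pos = pos
--             break
--
--     # If entire palette is black/dim/white, use full range
--     if start_pos >= end_pos:
--         return (0, 255)
--
--     # Ensure minimum range (at least 36 positions for 9 LEDs)
--     if (end_pos - start_pos) < 36:
--         # Expand range symmetrically
--         center = (start_pos + end_pos) // 2
--         start_pos = max(0, center - 18)
--         end_pos = min(255, center + 18)
--
--     return (start_pos, end_pos)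
-- ===== SOURCE B (Python) =====
-- def _is_white(r, g, b, threshold=200):
--     max_val = max(r, g, b)
--     min_val = min(r, g, b)
--     if max_val > 240:
--         if min_val >= threshold:
--             return True
--         sorted_vals = sorted([r, g, b], reverse=True)
--         if sorted_vals[0] >= 240 and sorted_vals[1] >= 240 and sorted_vals[2] >= 150:
--             return True
--     return r >= threshold and g >= threshold and b >= threshold
--
--
-- def find_visible_range(stops, min_brightness=10, white_threshold=200):
--     # One comprehension collecting the visible non-white positions in order,
--     # then the range is simply its first and last element.
--     visible = [pos for pos, r, g, b in stops
--                if max(r, g, b) > min_brightness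
--                and not _is_white(r, g, b, white_threshold)]
--     if not visible or visible[0] >= visible[-1]:
--         return (0, 255)
--     start, end = visible[0], visible[-1]
--     if end - start < 36:
--         center = (start + end) // 2
--         return (max(0, center - 18), min(255, center + 18))
--     return (start, end)
-- ===== Notes on version B (the rewrite author's own statement) =====
-- stated objective: simpler
-- what changed: Replaces A's two separate break-on-first-hit scans (forward pass, then a pass over reversed(stops)) with a single comprehension collecting all visible non-white positions, reading the range off its first and last element.
import Mathlib
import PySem

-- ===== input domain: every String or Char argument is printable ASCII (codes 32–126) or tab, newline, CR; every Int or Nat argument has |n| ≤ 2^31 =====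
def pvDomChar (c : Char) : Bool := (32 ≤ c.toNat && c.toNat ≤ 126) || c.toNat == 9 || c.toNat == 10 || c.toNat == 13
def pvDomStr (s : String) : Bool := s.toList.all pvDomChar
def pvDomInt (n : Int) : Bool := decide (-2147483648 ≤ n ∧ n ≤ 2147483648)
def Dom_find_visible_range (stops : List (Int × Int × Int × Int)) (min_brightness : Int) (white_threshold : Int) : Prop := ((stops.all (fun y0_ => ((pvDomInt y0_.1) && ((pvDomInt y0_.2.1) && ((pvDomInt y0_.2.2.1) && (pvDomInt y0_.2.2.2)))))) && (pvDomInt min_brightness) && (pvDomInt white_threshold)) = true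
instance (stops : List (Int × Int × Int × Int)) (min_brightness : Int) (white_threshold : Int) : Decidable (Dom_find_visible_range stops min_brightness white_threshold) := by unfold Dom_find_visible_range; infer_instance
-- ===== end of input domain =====

-- B replaces A's two break-on-first-hit scans (forward, then over reversed(stops)) by one
-- comprehension collecting all visible non-white positions, reading off its first and last
-- element; objective: simpler (same O(n) cost).

-- ===== PORT A =====
-- shared module helpers (identical code in Source A and Source B's _is_white)
def get_color_brightness (r g b : Int) : Int := max r (max g b)

-- is_white_color; the [0]/[1]/[2] accesses hit a 3-element list, always in range, so getD is exact
def is_white_color (r g b threshold : Int) : Bool :=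
  let max_val := max r (max g b)
  let min_val := min r (min g b)
  if max_val > 240 then
    if min_val ≥ threshold then true
    else
      let sorted_vals := PySem.List.sorted [r, g, b] (fun x => x) true
      if sorted_vals.getD 0 0 ≥ 240 && sorted_vals.getD 1 0 ≥ 240 && sorted_vals.getD 2 0 ≥ 150 then true
      else decide (r ≥ threshold) && decide (g ≥ threshold) && decide (b ≥ threshold)
  else decide (r ≥ threshold) && decide (g ≥ threshold) && decide (b ≥ threshold)

-- A's first loop: scan forward, break on first visible non-white stop, else start_pos stays 0
def fvr_first (mb wt : Int) : List (Int × Int × Int × Int) → Int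
  | [] => 0
  | (pos, r, g, b) :: t =>
    if get_color_brightness r g b > mb && !(is_white_color r g b wt) then pos
    else fvr_first mb wt t

-- A's second loop: scan over reversed(stops), break on first hit, else end_pos stays 255
def fvr_last (mb wt : Int) : List (Int × Int × Int × Int) → Int
  | [] => 255
  | (pos, r, g, b) :: t =>
    if get_color_brightness r g b > mb && !(is_white_color r g b wt) then pos
    else fvr_last mb wt t

def find_visible_range (stops : List (Int × Int × Int × Int)) (min_brightness : Int) (white_threshold : Int) : Int × Int :=
  if stops = [] then (0, 255)
  else
    let start_pos := fvr_first min_brightness white_threshold stops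
    let end_pos := fvr_last min_brightness white_threshold stops.reverse
    if start_pos ≥ end_pos then (0, 255)
    else if end_pos - start_pos < 36 then
      let center := PySem.Int.floordiv (start_pos + end_pos) 2
      (max 0 (center - 18), min 255 (center + 18))
    else (start_pos, end_pos)

-- ===== PORT B =====
-- the comprehension; visible[0]/visible[-1] are only read under the nonempty guard, so the
-- match gives them exactly
def find_visible_range_alt (stops : List (Int × Int × Int × Int)) (min_brightness : Int) (white_threshold : Int) : Int × Int :=
  let visible := stops.filterMap (fun s =>
    if get_color_brightness s.2.1 s.2.2.1 s.2.2.2 > min_brightness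
        && !(is_white_color s.2.1 s.2.2.1 s.2.2.2 white_threshold) then some s.1 else none)
  match visible with
  | [] => (0, 255)
  | p :: rest =>
    let last := (p :: rest).getLast (by simp)
    if p ≥ last then (0, 255)
    else if last - p < 36 then
      let center := PySem.Int.floordiv (p + last) 2
      (max 0 (center - 18), min 255 (center + 18))
    else (p, last)

-- ===== PRECONDITION & SPEC =====
def Spec_find_visible_range (stops : List (Int × Int × Int × Int)) (min_brightness : Int) (white_threshold : Int) (out : Int × Int) : Prop := out = find_visible_range_alt stops min_brightness white_threshold
instance (stops : List (Int × Int × Int × Int)) (min_brightness : Int) (white_threshold : Int) (out : Int × Int) : Decidable (Spec_find_visible_range stops min_brightness white_threshold out) := by unfold Spec_find_visible_range; infer_instance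

-- ===== CLAIM (what is proved, stated in full; the proofs are below) =====
def Claim_equal_find_visible_range : Prop := ∀ (stops : List (Int × Int × Int × Int)) (min_brightness : Int) (white_threshold : Int), Dom_find_visible_range stops min_brightness white_threshold → Spec_find_visible_range stops min_brightness white_threshold (find_visible_range stops min_brightness white_threshold)

-- ===== LEMMAS AND PROOFS =====

-- the visibility filter as a function of one stop
def fvr_keep (mb wt : Int) (s : Int × Int × Int × Int) : Option Int :=
  if get_color_brightness s.2.1 s.2.2.1 s.2.2.2 > mb
      && !(is_white_color s.2.1 s.2.2.1 s.2.2.2 wt) then some s.1 else none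

lemma fvr_first_eq (mb wt : Int) (l : List (Int × Int × Int × Int)) :
    fvr_first mb wt l = (l.filterMap (fvr_keep mb wt)).headD 0 := by
  induction l with
  | nil => rfl
  | cons s t ih =>
    obtain ⟨p, r, g, b⟩ := s
    have hk : fvr_keep mb wt (p, r, g, b)
        = if get_color_brightness r g b > mb && !(is_white_color r g b wt) then some p else none := rfl
    rw [fvr_first, List.filterMap_cons, hk]
    by_cases h : (get_color_brightness r g b > mb && !(is_white_color r g b wt)) = true
    · rw [if_pos h, if_pos h, List.headD_cons]
    · rw [if_neg h, if_neg h, ih]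

lemma fvr_last_eq (mb wt : Int) (l : List (Int × Int × Int × Int)) :
    fvr_last mb wt l = (l.filterMap (fvr_keep mb wt)).headD 255 := by
  induction l with
  | nil => rfl
  | cons s t ih =>
    obtain ⟨p, r, g, b⟩ := s
    have hk : fvr_keep mb wt (p, r, g, b)
        = if get_color_brightness r g b > mb && !(is_white_color r g b wt) then some p else none := rfl
    rw [fvr_last, List.filterMap_cons, hk]
    by_cases h : (get_color_brightness r g b > mb && !(is_white_color r g b wt)) = true
    · rw [if_pos h, if_pos h, List.headD_cons]
    · rw [if_neg h, if_neg h, ih]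

lemma fvr_last_rev (mb wt : Int) (l : List (Int × Int × Int × Int)) :
    fvr_last mb wt l.reverse = (l.filterMap (fvr_keep mb wt)).getLastD 255 := by
  rw [fvr_last_eq, List.filterMap_reverse, List.headD_eq_head?_getD, List.head?_reverse, List.getLastD_eq_getLast?]

-- ===== VERDICT (by name: the statement is the Claim_ definition above) =====
theorem find_visible_range_spec : Claim_equal_find_visible_range := by
  intro stops mb wt _
  show find_visible_range stops mb wt = find_visible_range_alt stops mb wt
  unfold find_visible_range find_visible_range_alt
  simp only [fvr_first_eq, fvr_last_rev]
  cases hv : stops.filterMap (fvr_keep mb wt) with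
  | nil =>
    -- no visible stops: A returns (0,255) either via the empty guard or via the final branch
    simp only [fvr_keep] at hv
    rw [hv]
    split_ifs <;> simp_all
  | cons p rest =>
    have hne : stops ≠ [] := by
      rintro rfl; simp at hv
    simp only [fvr_keep] at hv
    rw [hv]
    simp only [if_neg hne, List.headD_cons]
    rw [List.getLastD_eq_getLast?, List.getLast?_eq_some_getLast (by simp), Option.getD_some]
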